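-- pv_equiv track=rewrite | github.com/prajwal041/ProblemSolving | Learning/vanhack/zolando/min_no_digit.py | solution
-- ===== SOURCE A (Python) =====
-- def solution(n):
--     if n>=0 and n<=9:
--         return 0
--     else:
--         n=len(str(n))
--         result = '1'
--         for i in range(n-1):
--             result+='0'
--         return int(result)
-- ===== SOURCE B (Python) =====
-- def solution(n):
--     if 0 <= n <= 9:
--         return 0
--     d = len(str(n))
--     return 10 ** (d - 1)
-- ===== Notes on version B (the rewrite author's own statement) =====
-- stated objective: simpler
-- what changed: Replaces the digit-by-digit string-building loop plus int() re-parse with the closed form 10 ** (len(str(n)) - 1), pure integer arithmetic with no intermediate string of zeros.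
import Mathlib
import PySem

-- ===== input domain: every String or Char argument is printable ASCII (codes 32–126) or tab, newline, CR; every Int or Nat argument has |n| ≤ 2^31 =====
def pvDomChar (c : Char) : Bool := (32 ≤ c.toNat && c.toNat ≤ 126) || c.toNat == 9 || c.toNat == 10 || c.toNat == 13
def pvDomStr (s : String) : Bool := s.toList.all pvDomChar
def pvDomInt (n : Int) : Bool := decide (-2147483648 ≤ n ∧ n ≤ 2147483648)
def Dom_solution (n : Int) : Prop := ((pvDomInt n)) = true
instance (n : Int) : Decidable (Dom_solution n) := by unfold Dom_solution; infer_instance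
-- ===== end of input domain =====

-- B replaces A's digit-by-digit '1'+'0'*… string-building loop and int() re-parse
-- with the closed form 10 ** (len(str(n)) - 1): simpler, pure integer arithmetic.

-- ===== PORT A =====
def solution (n : Int) : Int :=
  if n ≥ 0 ∧ n ≤ 9 then 0
  else
    -- n = len(str(n))
    let m : Int := PySem.Str.len (PySem.Int.toStr n)
    -- result = '1'; for i in range(n-1): result += '0'
    let result : String := (PySem.List.pyRange 0 (m - 1) 1).foldl (fun r _ => r ++ "0") "1"
    -- int(result): parsing this string of digits always succeeds (proved below), so getD 0 is exact
    (PySem.Int.ofStr? result).getD 0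

-- ===== PORT B =====
def solution_alt (n : Int) : Int :=
  if 0 ≤ n ∧ n ≤ 9 then 0
  else
    -- d = len(str(n)); 10 ** (d - 1): d ≥ 1 always, so the exponent is a Nat (.toNat is exact)
    (10 : Int) ^ ((PySem.Str.len (PySem.Int.toStr n)) - 1).toNat

-- ===== PRECONDITION & SPEC =====
def Spec_solution (n : Int) (out : Int) : Prop := out = solution_alt n
instance (n : Int) (out : Int) : Decidable (Spec_solution n out) := by unfold Spec_solution; infer_instance

-- ===== CLAIM (what is proved, stated in full; the proofs are below) =====
def Claim_equal_solution : Prop := ∀ (n : Int), Dom_solution n → Spec_solution n (solution n)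

-- ===== LEMMAS AND PROOFS =====

-- the loop appends one '0' per element of the range
theorem toList_foldl_zeros (l : List Int) (s : String) :
    (l.foldl (fun r (_ : Int) => r ++ "0") s).toList = s.toList ++ List.replicate l.length '0' := by
  induction l generalizing s with
  | nil => simp
  | cons a l ih =>
      simp [List.foldl_cons, ih, String.toList_append, List.replicate_succ]

-- int('1' + '0'*k) = 10^k for every digit count reachable under Dom
theorem parse_one_zeros (k : Nat) (hk : k ≤ 10) :
    PySem.Int.ofChars? ('1' :: List.replicate k '0') = some (10 ^ k) := by
  interval_cases k <;> decide

theorem ofStr?_eq_ofChars? (s : String) :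
    PySem.Int.ofStr? s = PySem.Int.ofChars? s.toList := rfl

-- under Dom, str(n) has at most 11 characters (10 digits plus a possible sign)
theorem toChars_length_le (n : Int) (h : Dom_solution n) :
    (PySem.Int.toChars n).length ≤ 11 := by
  have habs : n.natAbs < 10 ^ 10 := by
    simp only [Dom_solution, pvDomInt, decide_eq_true_eq] at h
    omega
  unfold PySem.Int.toChars
  split
  · have := Nat.toDigits_length 10 n.natAbs 10 (by norm_num) habs
    simpa using by omega
  · have : n.toNat < 10 ^ 10 := by omega
    have := Nat.toDigits_length 10 n.toNat 10 (by norm_num) this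
    omega

-- ===== VERDICT (by name: the statement is the Claim_ definition above) =====
theorem solution_spec : Claim_equal_solution := by
  intro n hdom
  unfold Spec_solution solution solution_alt
  by_cases hg : 0 ≤ n ∧ n ≤ 9
  · simp [hg, ge_iff_le]
  · have hg' : ¬ (n ≥ 0 ∧ n ≤ 9) := hg
    simp only [hg', if_false]
    set d : Nat := (PySem.Int.toChars n).length with hd
    have hlen : PySem.Str.len (PySem.Int.toStr n) = (d : Int) := by
      simp [PySem.Str.len, PySem.Int.toList_toStr, hd]
    rw [hlen]
    set k : Nat := ((d : Int) - 1).toNat with hkdef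
    have hrl : (PySem.List.pyRange 0 ((d : Int) - 1) 1).length = k := by
      rw [PySem.List.length_pyRange_one]; omega
    have hres : ((PySem.List.pyRange 0 ((d : Int) - 1) 1).foldl
        (fun r (_ : Int) => r ++ "0") "1").toList = '1' :: List.replicate k '0' := by
      rw [toList_foldl_zeros, hrl]; rfl
    have hk10 : k ≤ 10 := by
      have := toChars_length_le n hdom
      omega
    rw [ofStr?_eq_ofChars?, hres, parse_one_zeros k hk10]
    rfl
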